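-- pv_equiv track=rewrite | github.com/yuheng2002/leetcode-75 | medium/two pointers/1679. ***Max Number of K-Sum Pairs.py | maxOperations
-- ===== SOURCE A (Python) =====
-- from typing import List
--
-- def maxOperations(nums: List[int], k: int) -> int:
--     nums.sort()
--     i = 0
--     j = len(nums) - 1
--     pairs = 0
--
--     while i < j:
--         s = nums[i] + nums[j]
--         if s == k:
--             pairs += 1
--             i += 1
--             j -= 1
--         elif s < k: # sum is not big enough, increment left pointer
--             i += 1
--         else:
--             j -= 1
--
--     return pairs
-- ===== SOURCE B (Python) =====
-- def maxOperations(nums, k):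
--     count = {}
--     for x in nums:
--         count[x] = count.get(x, 0) + 1
--     pairs = 0
--     for v, c in count.items():
--         comp = k - v
--         if v < comp:
--             pairs += min(c, count.get(comp, 0))
--         elif v == comp:
--             pairs += c // 2
--     return pairs
-- ===== Notes on version B (the rewrite author's own statement) =====
-- stated objective: alternative
-- what changed: Replaced sort + two-pointer sweep with a single-pass frequency dictionary: each distinct value pairs with its complement k-v via min of the two counts (count//2 when v == k-v); asymptotically O(n) vs O(n log n) but not measurably faster in CPython (C-implemented sort).
import Mathlib
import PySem

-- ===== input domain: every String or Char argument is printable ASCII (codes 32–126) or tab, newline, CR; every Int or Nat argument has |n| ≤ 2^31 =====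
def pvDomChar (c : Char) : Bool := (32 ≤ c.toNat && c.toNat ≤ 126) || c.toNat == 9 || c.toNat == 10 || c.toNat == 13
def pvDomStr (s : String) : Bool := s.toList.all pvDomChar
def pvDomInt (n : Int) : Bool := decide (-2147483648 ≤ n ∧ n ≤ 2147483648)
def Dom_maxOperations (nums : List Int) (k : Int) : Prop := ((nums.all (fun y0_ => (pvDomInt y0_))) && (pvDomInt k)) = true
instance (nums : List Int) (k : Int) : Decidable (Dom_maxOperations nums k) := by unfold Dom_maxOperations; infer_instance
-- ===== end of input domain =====

-- B replaces A's sort + two-pointer sweep by a one-pass frequency dictionary pairing each distinct value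
-- with its complement k-v (objective: alternative algorithm). A sorts nums in place; B does not mutate it —
-- the equivalence proved here is about the RETURN value only.


-- ===== PORT A =====
-- the while-loop of A: i,j pointers into the sorted list, pairs accumulator
def pvLoopA (xs : List Int) (k : Int) (i j pairs : Int) : Int :=
  if h : i < j then
    let s := PySem.List.pyGetD xs i 0 + PySem.List.pyGetD xs j 0
    if s = k then pvLoopA xs k (i + 1) (j - 1) (pairs + 1)
    else if s < k then pvLoopA xs k (i + 1) j pairs
    else pvLoopA xs k i (j - 1) pairs
  else pairs
termination_by (j - i).toNat
decreasing_by all_goals omega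

def maxOperations (nums : List Int) (k : Int) : Int :=
  let sortedNums := PySem.List.sorted nums (fun x => x) false
  pvLoopA sortedNums k 0 ((nums.length : Int) - 1) 0

-- ===== PORT B =====
def maxOperations_alt (nums : List Int) (k : Int) : Int :=
  let count := nums.foldl (fun d x => d.insert x (d.getD x 0 + 1)) (PySem.Dict.empty : PySem.Dict Int Int)
  count.items.foldl (fun pairs vc =>
    let v := vc.1
    let c := vc.2
    let comp := k - v
    if v < comp then pairs + min c (count.getD comp 0)
    else if v = comp then pairs + PySem.Int.floordiv c 2
    else pairs) 0

-- ===== PRECONDITION & SPEC =====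
def Spec_maxOperations (nums : List Int) (k : Int) (out : Int) : Prop := out = maxOperations_alt nums k
instance (nums : List Int) (k : Int) (out : Int) : Decidable (Spec_maxOperations nums k out) := by unfold Spec_maxOperations; infer_instance

-- ===== CLAIM (what is proved, stated in full; the proofs are below) =====
def Claim_equal_maxOperations : Prop := ∀ (nums : List Int) (k : Int), Dom_maxOperations nums k → Spec_maxOperations nums k (maxOperations nums k)

-- ===== LEMMAS AND PROOFS =====

-- the value contributed by a distinct value v: pairs (v, k-v) available in l
def pvContrib (l : List Int) (k v : Int) : Int :=
  if v < k - v then min (l.count v : Int) (l.count (k - v) : Int)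
  else if v = k - v then PySem.Int.floordiv (l.count v : Int) 2
  else 0

-- the common specification: total number of pairs, summed over distinct values
def pvG (l : List Int) (k : Int) : Int := ∑ v ∈ l.toFinset, pvContrib l k v

lemma pvContrib_zero_of_not_mem (l : List Int) (k v : Int) (h : v ∉ l) : pvContrib l k v = 0 := by
  unfold pvContrib
  have hc : l.count v = 0 := List.count_eq_zero.mpr h
  rw [hc]
  split_ifs with h1 h2
  · simp
  · simp [PySem.Int.floordiv]
  · rfl

-- pvG as a sum over any superset of the values
lemma pvG_eq_sum_superset (l : List Int) (k : Int) (S : Finset Int) (hS : l.toFinset ⊆ S) :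
    pvG l k = ∑ v ∈ S, pvContrib l k v := by
  unfold pvG
  refine Finset.sum_subset hS (fun v _ hv => ?_)
  exact pvContrib_zero_of_not_mem l k v (by simpa using hv)

lemma pvG_perm (l l' : List Int) (k : Int) (h : l.Perm l') : pvG l k = pvG l' k := by
  unfold pvG
  rw [List.toFinset_eq_of_perm _ _ h]
  refine Finset.sum_congr rfl (fun v _ => ?_)
  unfold pvContrib
  rw [h.count_eq, h.count_eq]

-- structural two-pointer recursion on a list segment
def pvTP (k : Int) (l : List Int) : Int :=
  match l with
  | [] => 0
  | [_] => 0
  | a :: y :: ys =>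
      let b := (y :: ys).getLast (by simp)
      let s := a + b
      if s = k then 1 + pvTP k ((y :: ys).dropLast)
      else if s < k then pvTP k (y :: ys)
      else pvTP k (a :: (y :: ys).dropLast)
termination_by l.length
decreasing_by all_goals simp [List.length_dropLast]

-- G1: dropping the minimum when every pair-sum with it is < k
lemma pvG_cons_lt (a : Int) (t : List Int) (k : Int) (h : ∀ v ∈ a :: t, a + v < k) :
    pvG (a :: t) k = pvG t k := by
  have hsub : t.toFinset ⊆ (a :: t).toFinset := by
    intro v hv; simp only [List.toFinset_cons, Finset.mem_insert]; right; exact hv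
  rw [pvG_eq_sum_superset t k ((a :: t).toFinset) hsub, pvG]
  refine Finset.sum_congr rfl (fun v hv => ?_)
  have hvl : v ∈ a :: t := List.mem_toFinset.mp hv
  have hav : a + v < k := h v hvl
  by_cases hva : v = a
  · subst hva
    have hknotl : k - v ∉ (v :: t) := fun hmem => by have := h _ hmem; omega
    have hknot : k - v ∉ t := fun hmem => hknotl (List.mem_cons_of_mem _ hmem)
    have hlt : v < k - v := by omega
    unfold pvContrib
    rw [if_pos hlt, if_pos hlt, List.count_eq_zero.mpr hknotl, List.count_eq_zero.mpr hknot]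
    omega
  · have hc1 : (a :: t).count v = t.count v := by
      rw [List.count_cons]
      have : ¬ (a = v) := by omega
      simp [this]
    have hc2 : (a :: t).count (k - v) = t.count (k - v) := by
      rw [List.count_cons]
      have : ¬ (a = k - v) := by omega
      simp [this]
    unfold pvContrib
    rw [hc1, hc2]

-- G2: dropping the maximum when every pair-sum with it is > k
lemma pvG_append_gt (t : List Int) (b k : Int) (h : ∀ v ∈ t ++ [b], v + b > k) :
    pvG (t ++ [b]) k = pvG t k := by
  have hsub : t.toFinset ⊆ (t ++ [b]).toFinset := by
    intro v hv; simp only [List.toFinset_append, Finset.mem_union]; left; exact hv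
  rw [pvG_eq_sum_superset t k ((t ++ [b]).toFinset) hsub, pvG]
  refine Finset.sum_congr rfl (fun v hv => ?_)
  have hvl : v ∈ t ++ [b] := List.mem_toFinset.mp hv
  have hvb' : v + b > k := h v hvl
  have hbk : k < b + b := by
    have := h b (List.mem_append_right _ (List.mem_singleton_self b)); omega
  by_cases hvb : v = b
  · subst hvb
    unfold pvContrib
    rw [if_neg (by omega), if_neg (by omega), if_neg (by omega), if_neg (by omega)]
  · have hc1 : (t ++ [b]).count v = t.count v := by
      rw [List.count_append, List.count_singleton]
      have : ¬ (b = v) := by omega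
      simp [this]
    have hc2 : (t ++ [b]).count (k - v) = t.count (k - v) := by
      rw [List.count_append, List.count_singleton]
      have : ¬ (b = k - v) := by omega
      simp [this]
    unfold pvContrib
    rw [hc1, hc2]

-- pvG of a constant list: count // 2
lemma pvG_const (a : Int) (m : List Int) (hall : ∀ v ∈ m, v = a) :
    pvG m (a + a) = PySem.Int.floordiv (m.count a : Int) 2 := by
  match m with
  | [] => simp [pvG, PySem.Int.floordiv]
  | x :: xs =>
    have hx : x = a := hall x List.mem_cons_self
    have hmem : a ∈ x :: xs := by rw [hx]; exact List.mem_cons_self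
    have hfs : (x :: xs).toFinset = {a} := by
      apply Finset.ext; intro v
      simp only [List.mem_toFinset, Finset.mem_singleton]
      exact ⟨fun hv => hall v hv, fun hv => hv ▸ hmem⟩
    rw [pvG, hfs, Finset.sum_singleton]
    unfold pvContrib
    rw [if_neg (by omega), if_pos (by omega)]

-- G3: removing one matched pair (min a, max b) with a + b = k
lemma pvG_pair (a : Int) (m : List Int) (b k : Int) (hab : a + b = k)
    (hmin : ∀ v ∈ a :: m ++ [b], a ≤ v) (hmax : ∀ v ∈ a :: m ++ [b], v ≤ b) :
    pvG (a :: m ++ [b]) k = 1 + pvG m k := by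
  have hcnt : ∀ v : Int, (a :: m ++ [b]).count v
      = m.count v + (if v = a then 1 else 0) + (if v = b then 1 else 0) := by
    intro v
    rw [List.count_append, List.count_cons, List.count_singleton]
    simp only [beq_iff_eq]
    split_ifs <;> omega
  by_cases hab2 : a = b
  · -- all elements equal a, k = a + a
    subst hab2
    have hk : k = a + a := by omega
    subst hk
    have hallm : ∀ v ∈ m, v = a := fun v hv => by
      have h1 := hmin v (by simp [hv])
      have h2 := hmax v (by simp [hv])
      omega
    have halll : ∀ v ∈ a :: m ++ [a], v = a := by
      intro v hv
      rcases List.mem_append.mp hv with h | h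
      · rcases List.mem_cons.mp h with h | h
        · exact h
        · exact hallm v h
      · simpa using h
    have hca : (a :: m ++ [a]).count a = m.count a + 2 := by
      rw [hcnt a]; simp
    rw [pvG_const a _ halll, pvG_const a m hallm, hca]
    rw [PySem.Int.floordiv_eq_ediv_of_pos (by omega), PySem.Int.floordiv_eq_ediv_of_pos (by omega)]
    push_cast
    omega
  · -- a < b
    have haltb : a < b := by
      have := hmin b (by simp); omega
    have hainl : a ∈ a :: m ++ [b] := by simp
    have hsub : m.toFinset ⊆ (a :: m ++ [b]).toFinset := by
      intro v hv
      simp only [List.mem_toFinset] at hv ⊢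
      simp [hv]
    rw [pvG_eq_sum_superset m k ((a :: m ++ [b]).toFinset) hsub, pvG]
    have hpt : ∀ v ∈ (a :: m ++ [b]).toFinset,
        pvContrib (a :: m ++ [b]) k v = pvContrib m k v + (if v = a then 1 else 0) := by
      intro v hv
      by_cases hva : v = a
      · subst hva
        have hkvb : k - v = b := by omega
        unfold pvContrib
        rw [if_pos (by omega), if_pos (by omega), hkvb, hcnt v, hcnt b,
          if_pos rfl, if_neg hab2, if_neg (by omega), if_pos rfl, if_pos rfl]
        push_cast
        omega
      · by_cases hvb : v = b
        · subst hvb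
          unfold pvContrib
          rw [if_neg (by omega), if_neg (by omega), if_neg (by omega), if_neg (by omega),
            if_neg hva]
          omega
        · have h1 : (a :: m ++ [b]).count v = m.count v := by
            rw [hcnt v, if_neg hva, if_neg hvb]; omega
          have h2 : (a :: m ++ [b]).count (k - v) = m.count (k - v) := by
            rw [hcnt (k - v), if_neg (by omega), if_neg (by omega)]; omega
          unfold pvContrib
          rw [h1, h2, if_neg hva]
          omega
    rw [Finset.sum_congr rfl hpt, Finset.sum_add_distrib]
    have hsum1 : (∑ v ∈ (a :: m ++ [b]).toFinset, (if v = a then (1:Int) else 0)) = 1 := by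
      rw [Finset.sum_ite_eq' ((a :: m ++ [b]).toFinset) a (fun _ => (1:Int))]
      simp
    rw [hsum1]
    omega

lemma pv_le_getLast (l : List Int) (h : l.Pairwise (· ≤ ·)) (hne : l ≠ []) :
    ∀ v ∈ l, v ≤ l.getLast hne := by
  induction l with
  | nil => exact absurd rfl hne
  | cons x xs ih =>
    intro v hv
    match xs with
    | [] =>
      have : v = x := by simpa using hv
      simp [this]
    | y :: ys =>
      rw [List.getLast_cons (by simp)]
      rcases List.mem_cons.mp hv with hvx | hvt
      · subst hvx
        have h1 := (List.pairwise_cons.mp h).1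
        exact h1 _ (List.getLast_mem (by simp))
      · exact ih (List.pairwise_cons.mp h).2 (by simp) v hvt

lemma pvTP_short (k : Int) (l : List Int) (h : l.length ≤ 1) : pvTP k l = 0 := by
  match l with
  | [] => simp [pvTP]
  | [x] => simp [pvTP]
  | a :: y :: ys => simp at h

lemma pvTP_two (k : Int) (l : List Int) (hne : l ≠ []) (h2 : 2 ≤ l.length) :
    pvTP k l = (if l.head hne + l.getLast hne = k then 1 + pvTP k (l.tail.dropLast)
      else if l.head hne + l.getLast hne < k then pvTP k l.tail
      else pvTP k l.dropLast) := by
  match l with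
  | a :: y :: ys =>
    rw [pvTP]
    simp only [List.head_cons, List.getLast_cons (l := y :: ys) (by simp), List.tail_cons,
      List.dropLast_cons₂]

lemma pvTP_eq_pvG (k : Int) (l : List Int) (hs : l.Pairwise (· ≤ ·)) : pvTP k l = pvG l k := by
  induction l using pvTP.induct k with
  | case1 => simp [pvTP, pvG]
  | case2 x =>
    rw [pvTP_short k [x] (by simp)]
    unfold pvG
    rw [show ([x] : List Int).toFinset = {x} by simp, Finset.sum_singleton]
    unfold pvContrib
    by_cases h1 : x < k - x
    · rw [if_pos h1]
      have : ([x] : List Int).count (k - x) = 0 := by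
        rw [List.count_singleton]
        have : ¬ (x = k - x) := by omega
        simp [this]
      rw [this]
      simp
    · rw [if_neg h1]
      by_cases h2 : x = k - x
      · rw [if_pos h2]
        rw [List.count_singleton]
        simp
      · rw [if_neg h2]
  | case3 a y ys b s hk ih =>
    have hbl : (a :: y :: ys).getLast (by simp) = b := List.getLast_cons (by simp)
    have hmax : ∀ v ∈ a :: y :: ys, v ≤ b := by
      intro v hv
      have := pv_le_getLast _ hs (by simp) v hv
      rwa [List.getLast_cons (by simp)] at this
    have hmin : ∀ v ∈ a :: y :: ys, a ≤ v := by
      intro v hv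
      rcases List.mem_cons.mp hv with h | h
      · exact le_of_eq h.symm
      · exact (List.pairwise_cons.mp hs).1 v h
    have hrw : a :: y :: ys = a :: (y :: ys).dropLast ++ [b] := by
      rw [List.cons_append, List.dropLast_append_getLast (by simp)]
    rw [pvTP_two k (a :: y :: ys) (by simp) (by simp)]
    simp only [List.head_cons, hbl, List.tail_cons]
    rw [if_pos (show a + b = k from hk)]
    conv_rhs => rw [hrw]
    rw [pvG_pair a ((y :: ys).dropLast) b k hk
      (fun v hv => hmin v (by rw [hrw]; exact hv))
      (fun v hv => hmax v (by rw [hrw]; exact hv))]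
    rw [ih (List.Pairwise.sublist (List.dropLast_sublist _) (List.pairwise_cons.mp hs).2)]
  | case4 a y ys b s hne hlt ih =>
    have hbl : (a :: y :: ys).getLast (by simp) = b := List.getLast_cons (by simp)
    have hmax : ∀ v ∈ a :: y :: ys, v ≤ b := by
      intro v hv
      have := pv_le_getLast _ hs (by simp) v hv
      rwa [List.getLast_cons (by simp)] at this
    rw [pvTP_two k (a :: y :: ys) (by simp) (by simp)]
    simp only [List.head_cons, hbl, List.tail_cons]
    rw [if_neg (show ¬ a + b = k from hne), if_pos (show a + b < k from hlt)]
    rw [pvG_cons_lt a (y :: ys) k (fun v hv => by have := hmax v hv; omega)]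
    exact ih (List.pairwise_cons.mp hs).2
  | case5 a y ys b s hne hnlt ih =>
    have hbl : (a :: y :: ys).getLast (by simp) = b := List.getLast_cons (by simp)
    have hmin : ∀ v ∈ a :: y :: ys, a ≤ v := by
      intro v hv
      rcases List.mem_cons.mp hv with h | h
      · exact le_of_eq h.symm
      · exact (List.pairwise_cons.mp hs).1 v h
    have hrw : a :: y :: ys = a :: (y :: ys).dropLast ++ [b] := by
      rw [List.cons_append, List.dropLast_append_getLast (by simp)]
    rw [pvTP_two k (a :: y :: ys) (by simp) (by simp)]
    simp only [List.head_cons, hbl, List.tail_cons, List.dropLast_cons₂]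
    rw [if_neg (show ¬ a + b = k from hne), if_neg (show ¬ a + b < k from hnlt)]
    conv_rhs => rw [hrw]
    rw [pvG_append_gt (a :: (y :: ys).dropLast) b k
      (fun v hv => by
        have hv' : v ∈ a :: y :: ys := by rw [hrw]; exact hv
        have h1 := hmin v hv'
        have h2 : s = a + b := rfl
        omega)]
    exact ih (List.Pairwise.sublist (List.Sublist.cons₂ a (List.dropLast_sublist _)) hs)

-- segment arithmetic for the two-pointer bridge
lemma pvSeg_tail (xs : List Int) (i m : Nat) :
    ((xs.drop i).take m).tail = (xs.drop (i + 1)).take (m - 1) := by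
  rw [← List.drop_one, List.drop_take, List.drop_drop]

lemma pvSeg_dropLast (xs : List Int) (i m : Nat) (h : m ≤ xs.length - i) :
    ((xs.drop i).take m).dropLast = (xs.drop i).take (m - 1) := by
  rw [List.dropLast_eq_take, List.length_take, List.length_drop, List.take_take]
  congr 1
  omega

-- bridge: the index loop on xs computes pvTP on the segment [i, j]
lemma pvLoopA_eq_pvTP (xs : List Int) (k : Int) :
    ∀ (n : Nat) (p : Int) (i j : Nat), j + 1 - i ≤ n → j < xs.length →
      pvLoopA xs k (i : Int) (j : Int) p = p + pvTP k ((xs.drop i).take (j + 1 - i)) := by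
  intro n
  induction n with
  | zero =>
    intro p i j hn hj
    rw [pvLoopA, dif_neg (by omega)]
    rw [pvTP_short k _ (by rw [List.length_take]; omega)]
    omega
  | succ n ihn =>
    intro p i j hn hj
    by_cases hij : i < j
    · have hlen : ((xs.drop i).take (j + 1 - i)).length = j + 1 - i := by
        rw [List.length_take, List.length_drop]; omega
      have hne : (xs.drop i).take (j + 1 - i) ≠ [] := by
        intro h; rw [h] at hlen; simp at hlen; omega
      have hhead : ((xs.drop i).take (j + 1 - i)).head hne = xs[i]'(by omega) := by
        rw [List.head_eq_getElem, List.getElem_take, List.getElem_drop]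
        congr 1
      have hlast : ((xs.drop i).take (j + 1 - i)).getLast hne = xs[j]'hj := by
        rw [List.getLast_eq_getElem, List.getElem_take, List.getElem_drop]
        congr 1
        omega
      have hgi : PySem.List.pyGetD xs (i : Int) 0 = xs[i]'(by omega) := by
        rw [PySem.List.pyGetD_natCast, List.getD_eq_getElem]
      have hgj : PySem.List.pyGetD xs (j : Int) 0 = xs[j]'hj := by
        rw [PySem.List.pyGetD_natCast, List.getD_eq_getElem]
      rw [pvLoopA, dif_pos (by exact_mod_cast hij)]
      rw [pvTP_two k _ hne (by omega), hhead, hlast, hgi, hgj]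
      have hj1 : ((j : Int) - 1) = ((j - 1 : Nat) : Int) := by omega
      have hi1 : ((i : Int) + 1) = ((i + 1 : Nat) : Int) := by omega
      by_cases h1 : xs[i]'(by omega) + xs[j]'hj = k
      · rw [if_pos h1, if_pos h1, hj1, hi1,
          ihn (p + 1) (i + 1) (j - 1) (by omega) (by omega)]
        rw [pvSeg_tail, pvSeg_dropLast xs (i + 1) _ (by omega)]
        have heq : j - 1 + 1 - (i + 1) = j + 1 - i - 1 - 1 := by omega
        rw [heq]
        ring
      · rw [if_neg h1, if_neg h1]
        by_cases h2 : xs[i]'(by omega) + xs[j]'hj < k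
        · rw [if_pos h2, if_pos h2, hi1, ihn p (i + 1) j (by omega) hj]
          rw [pvSeg_tail]
          have heq : j + 1 - (i + 1) = j + 1 - i - 1 := by omega
          rw [heq]
        · rw [if_neg h2, if_neg h2, hj1, ihn p i (j - 1) (by omega) (by omega)]
          rw [pvSeg_dropLast xs i _ (by omega)]
          have heq : j - 1 + 1 - i = j + 1 - i - 1 := by omega
          rw [heq]
    · rw [pvLoopA, dif_neg (by omega)]
      rw [pvTP_short k _ (by rw [List.length_take]; omega)]
      omega

lemma pvA_eq_pvG (nums : List Int) (k : Int) : maxOperations nums k = pvG nums k := by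
  unfold maxOperations
  match hn : nums with
  | [] =>
    rw [pvLoopA]
    norm_num [pvG]
  | x :: xs =>
    have hslen : (PySem.List.sorted (x :: xs) (fun x => x) false).length = (x :: xs).length :=
      PySem.List.length_sorted _ _ _
    have hlen1 : 1 ≤ (x :: xs).length := by simp
    have hcast : ((x :: xs).length : Int) - 1 = (((x :: xs).length - 1 : Nat) : Int) := by
      omega
    have hb := pvLoopA_eq_pvTP (PySem.List.sorted (x :: xs) (fun x => x) false) k
      ((x :: xs).length) 0 0 ((x :: xs).length - 1) (by omega) (by simp [hslen])
    simp only [Nat.cast_zero, List.drop_zero] at hb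
    have hseg : (x :: xs).length - 1 + 1 - 0 = (x :: xs).length := by omega
    rw [hseg, List.take_of_length_le (by omega)] at hb
    show pvLoopA (PySem.List.sorted (x :: xs) (fun x => x) false) k 0
      (((x :: xs).length : Int) - 1) 0 = pvG (x :: xs) k
    rw [hcast, hb, zero_add,
      pvTP_eq_pvG k _ (by simpa using PySem.List.sorted_pairwise (x :: xs) (fun x => x)),
      pvG_perm _ _ k (PySem.List.sorted_perm _ _ _)]

lemma pvAlt_eq_pvG (nums : List Int) (k : Int) : maxOperations_alt nums k = pvG nums k := by
  unfold maxOperations_alt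
  simp only [PySem.Dict.foldl_insert_getD_add_one_eq_counter, PySem.Dict.items_counter,
    List.foldl_map]
  have hb : ∀ (acc : Int) (v : Int), v ∈ PySem.Set.ofList nums →
      (fun (pairs : Int) (vc : Int × Int) =>
        if vc.1 < k - vc.1 then pairs + min vc.2 ((PySem.Dict.counter nums).getD (k - vc.1) 0)
        else if vc.1 = k - vc.1 then pairs + PySem.Int.floordiv vc.2 2
        else pairs) acc (v, (nums.count v : Int)) = acc + pvContrib nums k v := by
    intro acc v _
    simp only [pvContrib, PySem.Dict.getD_counter]
    split_ifs <;> simp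
  calc (PySem.Set.ofList nums).foldl (fun acc v =>
          (fun (pairs : Int) (vc : Int × Int) =>
            if vc.1 < k - vc.1 then pairs + min vc.2 ((PySem.Dict.counter nums).getD (k - vc.1) 0)
            else if vc.1 = k - vc.1 then pairs + PySem.Int.floordiv vc.2 2
            else pairs) acc (v, (nums.count v : Int))) 0
      = (PySem.Set.ofList nums).foldl (fun acc v => acc + pvContrib nums k v) 0 :=
        PySem.List.foldl_congr_mem _ _ _ _ hb
    _ = 0 + ((PySem.Set.ofList nums).map (pvContrib nums k)).sum := PySem.List.foldl_add _ _ _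
    _ = pvG nums k := by
        rw [zero_add, pvG, ← List.sum_toFinset _ (PySem.Set.nodup_ofList nums)]
        congr 1
        apply Finset.ext
        intro v
        simp [PySem.Set.mem_ofList]

-- ===== VERDICT (by name: the statement is the Claim_ definition above) =====
theorem maxOperations_spec : Claim_equal_maxOperations := by
  intro nums k _
  unfold Spec_maxOperations
  rw [pvA_eq_pvG, pvAlt_eq_pvG]
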